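-- pv_equiv track=rewrite | github.com/bikuta6/auto-planning-project | generate_placeholder_fd_problem.py | wrap_init_facts
-- ===== SOURCE A (Python) =====
-- def wrap_init_facts(facts: list[str], indent: str = "    ", per_line: int = 3) -> list[str]:
--     lines: list[str] = []
--     buf: list[str] = []
--     for fact in facts:
--         buf.append(fact)
--         if len(buf) >= per_line:
--             lines.append(indent + " ".join(buf))
--             buf = []
--     if buf:
--         lines.append(indent + " ".join(buf))
--     return lines
-- ===== SOURCE B (Python) =====
-- def wrap_init_facts(facts: list[str], indent: str = "    ", per_line: int = 3) -> list[str]: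
--     step = per_line if per_line >= 1 else 1
--     return [indent + " ".join(facts[i:i + step]) for i in range(0, len(facts), step)]
-- ===== Notes on version B (the rewrite author's own statement) =====
-- stated objective: simpler
-- what changed: Replaces the accumulator-buffer-with-flush loop by direct index-based slicing: one comprehension over range(0, len(facts), max(per_line,1)) joins each slice, so no buffer state and no trailing flush branch.
import Mathlib
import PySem

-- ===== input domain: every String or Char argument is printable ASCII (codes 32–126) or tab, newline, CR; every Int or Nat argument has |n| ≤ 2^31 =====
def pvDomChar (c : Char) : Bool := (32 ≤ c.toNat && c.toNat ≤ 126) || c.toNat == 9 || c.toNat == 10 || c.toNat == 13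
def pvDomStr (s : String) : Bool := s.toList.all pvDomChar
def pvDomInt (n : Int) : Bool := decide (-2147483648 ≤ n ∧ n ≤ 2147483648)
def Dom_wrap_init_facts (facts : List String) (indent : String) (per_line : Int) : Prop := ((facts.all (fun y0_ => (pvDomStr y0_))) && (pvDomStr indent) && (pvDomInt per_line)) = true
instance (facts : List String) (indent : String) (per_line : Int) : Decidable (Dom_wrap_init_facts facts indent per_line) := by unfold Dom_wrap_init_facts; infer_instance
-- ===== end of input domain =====

-- B replaces A's buffer-accumulate-and-flush loop by direct index-based slicing
-- over range(0, len(facts), max(per_line, 1)); same return value, objective: simpler.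

-- ===== PORT A =====
def wrap_init_facts (facts : List String) (indent : String) (per_line : Int) : List String :=
  -- lines/buf fold; flush of the non-empty buffer at the end, exactly as in A
  let st := facts.foldl
    (fun (st : List String × List String) fact =>
      let buf := st.2 ++ [fact]
      if per_line ≤ (buf.length : Int) then
        (st.1 ++ [indent ++ PySem.Str.join " " buf], ([] : List String))
      else (st.1, buf))
    ([], [])
  if st.2 ≠ [] then st.1 ++ [indent ++ PySem.Str.join " " st.2] else st.1

-- ===== PORT B =====
def wrap_init_facts_alt (facts : List String) (indent : String) (per_line : Int) : List String :=
  let step : Int := if 1 ≤ per_line then per_line else 1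
  (PySem.List.pyRange 0 (facts.length : Int) step).map
    (fun i => indent ++ PySem.Str.join " " (PySem.List.slice facts (some i) (some (i + step))))

-- ===== PRECONDITION & SPEC =====
def Spec_wrap_init_facts (facts : List String) (indent : String) (per_line : Int) (out : List String) : Prop := out = wrap_init_facts_alt facts indent per_line
instance (facts : List String) (indent : String) (per_line : Int) (out : List String) : Decidable (Spec_wrap_init_facts facts indent per_line out) := by unfold Spec_wrap_init_facts; infer_instance

-- ===== CLAIM (what is proved, stated in full; the proofs are below) =====
def Claim_equal_wrap_init_facts : Prop := ∀ (facts : List String) (indent : String) (per_line : Int), Dom_wrap_init_facts facts indent per_line → Spec_wrap_init_facts facts indent per_line (wrap_init_facts facts indent per_line)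

-- ===== LEMMAS AND PROOFS =====

-- reference chunking: groups of n taken from the front (proof-only helper)
def pvChunks (n : Nat) : List String → List (List String)
  | [] => []
  | x :: xs => ((x :: xs).take n) :: pvChunks n (xs.drop (n - 1))
termination_by l => l.length
decreasing_by simp only [List.length_drop, List.length_cons]; omega

lemma pvChunks_cons_of_len (n : Nat) (hn : 0 < n) (c xs : List String) (hc : c.length = n) :
    pvChunks n (c ++ xs) = c :: pvChunks n xs := by
  cases c with
  | nil => simp at hc; omega
  | cons b rest =>
    have hr : rest.length = n - 1 := by simp at hc; omega
    simp only [List.cons_append]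
    rw [pvChunks]
    have ht : (b :: (rest ++ xs)).take n = b :: rest := by
      cases n with
      | zero => omega
      | succ m =>
        have hrm : rest.length = m := by omega
        rw [List.take_succ_cons, List.take_left' hrm]
    rw [ht, List.drop_left' hr]

lemma pvChunks_short (n : Nat) (c : List String) (hne : c ≠ []) (hc : c.length ≤ n) :
    pvChunks n c = [c] := by
  cases c with
  | nil => exact absurd rfl hne
  | cons b rest =>
    rw [pvChunks]
    rw [List.take_of_length_le hc, List.drop_eq_nil_of_le (by simp at hc ⊢; omega)]
    rw [pvChunks]

-- A's loop, from an arbitrary start state, produces chunks of size n = max(per_line, 1)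
lemma A_loop (indent : String) (per_line : Int) (n : Nat) (hn : 0 < n)
    (hrel : ∀ m : Nat, 0 < m → ((per_line ≤ (m : Int)) ↔ n ≤ m)) :
    ∀ (l acc buf : List String), buf.length < n →
    (let st := l.foldl
      (fun (st : List String × List String) fact =>
        let b := st.2 ++ [fact]
        if per_line ≤ (b.length : Int) then
          (st.1 ++ [indent ++ PySem.Str.join " " b], ([] : List String))
        else (st.1, b))
      (acc, buf);
     if st.2 ≠ [] then st.1 ++ [indent ++ PySem.Str.join " " st.2] else st.1)
    = acc ++ (pvChunks n (buf ++ l)).map (fun c => indent ++ PySem.Str.join " " c) := by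
  intro l
  induction l with
  | nil =>
    intro acc buf hbuf
    by_cases hb : buf = []
    · subst hb
      simp only [List.nil_append]
      rw [pvChunks]
      simp
    · simp only [List.foldl_nil, List.append_nil]
      rw [pvChunks_short n buf hb (by omega)]
      simp [hb]
  | cons x xs ih =>
    intro acc buf hbuf
    simp only [List.foldl_cons]
    have hlen : 0 < (buf ++ [x]).length := by simp
    by_cases h : n ≤ (buf ++ [x]).length
    · have hc : per_line ≤ ((buf ++ [x]).length : Int) := (hrel _ hlen).mpr h
      have hfull : (buf ++ [x]).length = n := by
        simp only [List.length_append, List.length_cons, List.length_nil] at h ⊢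
        omega
      simp only [hc, if_pos]
      have hrec := ih (acc ++ [indent ++ PySem.Str.join " " (buf ++ [x])]) [] (by simpa using hn)
      simp only [List.nil_append] at hrec
      rw [hrec]
      have hsplit : buf ++ x :: xs = (buf ++ [x]) ++ xs := by simp
      rw [hsplit, pvChunks_cons_of_len n hn _ xs hfull]
      simp
    · have hc : ¬ per_line ≤ ((buf ++ [x]).length : Int) := fun hh => h ((hrel _ hlen).mp hh)
      simp only [hc, if_neg, not_false_iff]
      have hrec := ih acc (buf ++ [x]) (by simp at h ⊢; omega)
      rw [hrec]
      have hsplit : buf ++ x :: xs = (buf ++ [x]) ++ xs := by simp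
      rw [hsplit]

lemma A_eq_chunks (facts : List String) (indent : String) (per_line : Int) :
    wrap_init_facts facts indent per_line
      = (pvChunks (max per_line 1).toNat facts).map (fun c => indent ++ PySem.Str.join " " c) := by
  have hn : 0 < (max per_line 1).toNat := by omega
  have h := A_loop indent per_line (max per_line 1).toNat hn
    (by intro m hm; constructor <;> (intro; omega)) facts [] [] hn
  simpa [wrap_init_facts] using h

-- chunks as a range-indexed map (the shape of B's comprehension), by induction on a length bound
lemma chunks_eq_range (n : Nat) (hn : 0 < n) (indent : String) :
    ∀ (N : Nat) (facts : List String), facts.length ≤ N →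
    (pvChunks n facts).map (fun c => indent ++ PySem.Str.join " " c)
      = (List.range (if 0 < facts.length then (facts.length - 1) / n + 1 else 0)).map
          (fun k => indent ++ PySem.Str.join " " ((facts.drop (n * k)).take n)) := by
  intro N
  induction N with
  | zero =>
    intro facts hN
    have : facts = [] := List.length_eq_zero_iff.mp (by omega)
    subst this
    rw [pvChunks]
    simp
  | succ N ih =>
    intro facts hN
    cases facts with
    | nil => rw [pvChunks]; simp
    | cons x xs =>
      have hrest : xs.drop (n - 1) = (x :: xs).drop n := by
        cases n with
        | zero => omega
        | succ m => simp
      have hr := ih (xs.drop (n - 1)) (by simp only [List.length_drop]; simp at hN; omega)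
      have hcnt : (if 0 < (xs.drop (n - 1)).length then ((xs.drop (n - 1)).length - 1) / n + 1 else 0)
          = xs.length / n := by
        by_cases hd : 0 < (xs.drop (n - 1)).length
        · rw [if_pos hd]
          simp only [List.length_drop] at hd ⊢
          have heq : xs.length - (n - 1) - 1 = xs.length - n := by omega
          rw [heq]
          have hdiv := Nat.add_div_right (xs.length - n) hn
          have hx : xs.length - n + n = xs.length := by omega
          rw [hx] at hdiv
          exact hdiv.symm
        · rw [if_neg hd]
          simp only [List.length_drop] at hd
          rw [Nat.div_eq_of_lt (by omega)]
      rw [pvChunks]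
      rw [List.map_cons, hr, hcnt]
      simp only [List.length_cons, Nat.add_sub_cancel]
      rw [if_pos (Nat.succ_pos xs.length)]
      have htail : List.map (fun k => indent ++ PySem.Str.join " " (List.take n (List.drop (n * k) (List.drop (n - 1) xs)))) (List.range (xs.length / n))
          = List.map ((fun k => indent ++ PySem.Str.join " " (List.take n (List.drop (n * k) (x :: xs)))) ∘ (· + 1)) (List.range (xs.length / n)) := by
        apply List.map_congr_left
        intro a _
        simp only [Function.comp]
        obtain ⟨m, rfl⟩ : ∃ m, n = m + 1 := ⟨n - 1, by omega⟩
        have e : m + 1 - 1 = m := rfl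
        rw [e, List.drop_drop]
        have h1 : (m + 1) * (a + 1) = (m + (m + 1) * a) + 1 := by ring
        rw [h1, List.drop_succ_cons]
      rw [List.range_succ_eq_map, List.map_cons, List.map_map, htail]
      simp

-- B computes the same range-indexed map
lemma B_eq_chunks (facts : List String) (indent : String) (per_line : Int) :
    wrap_init_facts_alt facts indent per_line
      = (pvChunks (max per_line 1).toNat facts).map (fun c => indent ++ PySem.Str.join " " c) := by
  set n : Nat := (max per_line 1).toNat with hn_def
  have hn : 0 < n := by omega
  have hstep : (if 1 ≤ per_line then per_line else 1) = (n : Int) := by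
    rw [hn_def]; split_ifs with h <;> omega
  unfold wrap_init_facts_alt
  simp only [hstep]
  rw [PySem.List.pyRange_of_pos 0 (facts.length : Int) (by exact_mod_cast hn)]
  rw [chunks_eq_range n hn indent facts.length facts le_rfl, List.map_map]
  have hcount : (if (0:Int) < (facts.length : Int)
        then (((facts.length : Int) - 0 + (n : Int) - 1) / (n : Int)).toNat else 0)
      = (if 0 < facts.length then (facts.length - 1) / n + 1 else 0) := by
    by_cases hp : 0 < facts.length
    · have h1 : ((facts.length : Int) - 0 + (n : Int) - 1) = ((facts.length + n - 1 : Nat) : Int) := by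
        omega
      simp only [hp, if_pos, (by exact_mod_cast hp : (0:Int) < (facts.length : Int)), h1]
      rw [← Int.natCast_div, Int.toNat_natCast]
      have h2 : facts.length + n - 1 = (facts.length - 1) + n := by omega
      rw [h2, Nat.add_div_right _ hn]
    · have hz : facts.length = 0 := by omega
      simp [hz]
  rw [hcount]
  apply List.map_congr_left
  intro k _
  simp only [Function.comp]
  have hidx : (0 : Int) + (n : Int) * (k : Int) = ((n * k : Nat) : Int) := by
    push_cast
    ring
  rw [hidx, PySem.List.slice_natCast_add]

-- ===== VERDICT (by name: the statement is the Claim_ definition above) =====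
theorem wrap_init_facts_spec : Claim_equal_wrap_init_facts := by
  intro facts indent per_line _
  unfold Spec_wrap_init_facts
  rw [A_eq_chunks, B_eq_chunks]
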